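-- pv_equiv track=rewrite | github.com/huntrbrooks/ChangeRoom | backend/services/analyze_clothing.py | _extract_specific_item_type
-- ===== SOURCE A (Python) =====
-- def _extract_specific_item_type(description: str, category: str) -> str:
--     """
--     Extracts specific item type from description for better filename generation.
--     Returns user-friendly names like 'boots', 'shirt', 'hat', 'pants', 'shorts', 'dress', 'skirt'.
--     """
--     description_lower = description.lower()
--
--     # Map to specific item types based on category and description
--     if category == "shoes":
--         if any(word in description_lower for word in ["boot", "combat boot", "hiking boot", "work boot"]):
--             return "boots"
--         elif any(word in description_lower for word in ["sneaker", "trainer", "athletic shoe", "running shoe"]):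
--             return "sneakers"
--         elif any(word in description_lower for word in ["sandal", "flip-flop"]):
--             return "sandals"
--         elif any(word in description_lower for word in ["heel", "pump", "stiletto"]):
--             return "heels"
--         elif any(word in description_lower for word in ["flat", "ballet flat"]):
--             return "flats"
--         elif any(word in description_lower for word in ["loafer", "oxford"]):
--             return "loafers"
--         else:
--             return "shoes"
--
--     elif category == "lower_body":
--         if any(word in description_lower for word in ["short", "bermuda", "cargo short"]):
--             return "shorts"
--         elif any(word in description_lower for word in ["skirt", "mini skirt", "pencil skirt", "a-line skirt"]):
--             return "skirt"
--         elif any(word in description_lower for word in ["jean", "denim"]):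
--             return "jeans"
--         elif any(word in description_lower for word in ["pant", "trouser", "slack"]):
--             return "pants"
--         elif any(word in description_lower for word in ["legging", "yoga pant"]):
--             return "leggings"
--         else:
--             return "pants"
--
--     elif category == "upper_body":
--         if any(word in description_lower for word in ["t-shirt", "tee", "tshirt"]):
--             return "tshirt"
--         elif any(word in description_lower for word in ["shirt", "button-down", "dress shirt"]):
--             return "shirt"
--         elif any(word in description_lower for word in ["blouse"]):
--             return "blouse"
--         elif any(word in description_lower for word in ["sweater", "pullover"]):
--             return "sweater"
--         elif any(word in description_lower for word in ["tank top", "camisole"]):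
--             return "tank"
--         elif any(word in description_lower for word in ["polo"]):
--             return "polo"
--         else:
--             return "shirt"
--
--     elif category == "accessories":
--         if any(word in description_lower for word in ["hat", "cap", "baseball cap", "beanie"]):
--             return "hat"
--         elif any(word in description_lower for word in ["bag", "purse", "backpack", "handbag"]):
--             return "bag"
--         elif any(word in description_lower for word in ["belt"]):
--             return "belt"
--         elif any(word in description_lower for word in ["scarf"]):
--             return "scarf"
--         else:
--             return "accessory"
--
--     elif category == "dresses":
--         if any(word in description_lower for word in ["dress", "gown", "frock"]):
--             return "dress"
--         elif any(word in description_lower for word in ["jumpsuit"]):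
--             return "jumpsuit"
--         elif any(word in description_lower for word in ["romper"]):
--             return "romper"
--         else:
--             return "dress"
--
--     elif category == "outerwear":
--         if any(word in description_lower for word in ["jacket", "bomber", "denim jacket"]):
--             return "jacket"
--         elif any(word in description_lower for word in ["coat", "trench coat", "overcoat"]):
--             return "coat"
--         elif any(word in description_lower for word in ["blazer"]):
--             return "blazer"
--         elif any(word in description_lower for word in ["hoodie", "hoody"]):
--             return "hoodie"
--         else:
--             return "jacket"
--
--     return "unknown"
-- ===== SOURCE B (Python) =====
-- # One flat keyword table per category: (keyword, rank, label).  The function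
-- # makes a single pass over all keywords keeping the best-ranked match so far
-- # (running minimum), instead of an ordered chain of grouped any() checks
-- # with early return.
-- _KEYWORDS = {
--     "shoes": ([
--         ("boot", 0, "boots"),
--         ("combat boot", 0, "boots"),
--         ("hiking boot", 0, "boots"),
--         ("work boot", 0, "boots"),
--         ("sneaker", 1, "sneakers"),
--         ("trainer", 1, "sneakers"),
--         ("athletic shoe", 1, "sneakers"),
--         ("running shoe", 1, "sneakers"),
--         ("sandal", 2, "sandals"),
--         ("flip-flop", 2, "sandals"),
--         ("heel", 3, "heels"),
--         ("pump", 3, "heels"),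
--         ("stiletto", 3, "heels"),
--         ("flat", 4, "flats"),
--         ("ballet flat", 4, "flats"),
--         ("loafer", 5, "loafers"),
--         ("oxford", 5, "loafers"),
--     ], "shoes"),
--     "lower_body": ([
--         ("short", 0, "shorts"),
--         ("bermuda", 0, "shorts"),
--         ("cargo short", 0, "shorts"),
--         ("skirt", 1, "skirt"),
--         ("mini skirt", 1, "skirt"),
--         ("pencil skirt", 1, "skirt"),
--         ("a-line skirt", 1, "skirt"),
--         ("jean", 2, "jeans"),
--         ("denim", 2, "jeans"),
--         ("pant", 3, "pants"),
--         ("trouser", 3, "pants"),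
--         ("slack", 3, "pants"),
--         ("legging", 4, "leggings"),
--         ("yoga pant", 4, "leggings"),
--     ], "pants"),
--     "upper_body": ([
--         ("t-shirt", 0, "tshirt"),
--         ("tee", 0, "tshirt"),
--         ("tshirt", 0, "tshirt"),
--         ("shirt", 1, "shirt"),
--         ("button-down", 1, "shirt"),
--         ("dress shirt", 1, "shirt"),
--         ("blouse", 2, "blouse"),
--         ("sweater", 3, "sweater"),
--         ("pullover", 3, "sweater"),
--         ("tank top", 4, "tank"),
--         ("camisole", 4, "tank"),
--         ("polo", 5, "polo"),
--     ], "shirt"),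
--     "accessories": ([
--         ("hat", 0, "hat"),
--         ("cap", 0, "hat"),
--         ("baseball cap", 0, "hat"),
--         ("beanie", 0, "hat"),
--         ("bag", 1, "bag"),
--         ("purse", 1, "bag"),
--         ("backpack", 1, "bag"),
--         ("handbag", 1, "bag"),
--         ("belt", 2, "belt"),
--         ("scarf", 3, "scarf"),
--     ], "accessory"),
--     "dresses": ([
--         ("dress", 0, "dress"),
--         ("gown", 0, "dress"),
--         ("frock", 0, "dress"),
--         ("jumpsuit", 1, "jumpsuit"),
--         ("romper", 2, "romper"),
--     ], "dress"),
--     "outerwear": ([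
--         ("jacket", 0, "jacket"),
--         ("bomber", 0, "jacket"),
--         ("denim jacket", 0, "jacket"),
--         ("coat", 1, "coat"),
--         ("trench coat", 1, "coat"),
--         ("overcoat", 1, "coat"),
--         ("blazer", 2, "blazer"),
--         ("hoodie", 3, "hoodie"),
--         ("hoody", 3, "hoodie"),
--     ], "jacket"),
-- }
--
--
-- def _extract_specific_item_type(description: str, category: str) -> str:
--     if category not in _KEYWORDS:
--         return "unknown"
--     triples, default = _KEYWORDS[category]
--     dl = description.lower()
--     best = None
--     for kw, rank, label in triples:
--         if kw in dl and (best is None or rank < best[0]):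
--             best = (rank, label)
--     return default if best is None else best[1]
-- ===== Notes on version B (the rewrite author's own statement) =====
-- stated objective: alternative
-- what changed: Replaced the six ordered if/elif chains of grouped any() checks with a flat per-category keyword table (keyword, rank, label) scanned in one pass that keeps the minimum-rank match; no rule groups and no early return.
import Mathlib
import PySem

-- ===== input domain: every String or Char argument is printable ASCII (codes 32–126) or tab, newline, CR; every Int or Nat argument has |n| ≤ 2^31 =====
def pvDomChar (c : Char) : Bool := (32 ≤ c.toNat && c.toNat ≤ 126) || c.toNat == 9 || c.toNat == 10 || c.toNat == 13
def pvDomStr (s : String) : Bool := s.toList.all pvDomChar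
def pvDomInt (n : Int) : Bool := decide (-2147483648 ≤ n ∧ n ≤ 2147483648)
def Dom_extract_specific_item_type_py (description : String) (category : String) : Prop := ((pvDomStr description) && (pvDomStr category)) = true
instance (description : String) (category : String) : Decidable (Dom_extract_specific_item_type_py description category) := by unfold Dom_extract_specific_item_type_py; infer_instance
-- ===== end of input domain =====

-- B replaces A's ordered if/elif branch chains (grouped any() checks with early
-- return) by one flat keyword table per category scanned in a single pass that
-- keeps the best-ranked (minimum-rank) match (objective: alternative).

-- ===== PORT A =====
def extract_specific_item_type_py (description : String) (category : String) : String :=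
  let dl := PySem.Str.lower description
  if category = "shoes" then
    if ["boot", "combat boot", "hiking boot", "work boot"].any (fun w => PySem.Str.isIn w dl) then "boots"
    else if ["sneaker", "trainer", "athletic shoe", "running shoe"].any (fun w => PySem.Str.isIn w dl) then "sneakers"
    else if ["sandal", "flip-flop"].any (fun w => PySem.Str.isIn w dl) then "sandals"
    else if ["heel", "pump", "stiletto"].any (fun w => PySem.Str.isIn w dl) then "heels"
    else if ["flat", "ballet flat"].any (fun w => PySem.Str.isIn w dl) then "flats"
    else if ["loafer", "oxford"].any (fun w => PySem.Str.isIn w dl) then "loafers"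
    else "shoes"
  else if category = "lower_body" then
    if ["short", "bermuda", "cargo short"].any (fun w => PySem.Str.isIn w dl) then "shorts"
    else if ["skirt", "mini skirt", "pencil skirt", "a-line skirt"].any (fun w => PySem.Str.isIn w dl) then "skirt"
    else if ["jean", "denim"].any (fun w => PySem.Str.isIn w dl) then "jeans"
    else if ["pant", "trouser", "slack"].any (fun w => PySem.Str.isIn w dl) then "pants"
    else if ["legging", "yoga pant"].any (fun w => PySem.Str.isIn w dl) then "leggings"
    else "pants"
  else if category = "upper_body" then
    if ["t-shirt", "tee", "tshirt"].any (fun w => PySem.Str.isIn w dl) then "tshirt"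
    else if ["shirt", "button-down", "dress shirt"].any (fun w => PySem.Str.isIn w dl) then "shirt"
    else if ["blouse"].any (fun w => PySem.Str.isIn w dl) then "blouse"
    else if ["sweater", "pullover"].any (fun w => PySem.Str.isIn w dl) then "sweater"
    else if ["tank top", "camisole"].any (fun w => PySem.Str.isIn w dl) then "tank"
    else if ["polo"].any (fun w => PySem.Str.isIn w dl) then "polo"
    else "shirt"
  else if category = "accessories" then
    if ["hat", "cap", "baseball cap", "beanie"].any (fun w => PySem.Str.isIn w dl) then "hat"
    else if ["bag", "purse", "backpack", "handbag"].any (fun w => PySem.Str.isIn w dl) then "bag"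
    else if ["belt"].any (fun w => PySem.Str.isIn w dl) then "belt"
    else if ["scarf"].any (fun w => PySem.Str.isIn w dl) then "scarf"
    else "accessory"
  else if category = "dresses" then
    if ["dress", "gown", "frock"].any (fun w => PySem.Str.isIn w dl) then "dress"
    else if ["jumpsuit"].any (fun w => PySem.Str.isIn w dl) then "jumpsuit"
    else if ["romper"].any (fun w => PySem.Str.isIn w dl) then "romper"
    else "dress"
  else if category = "outerwear" then
    if ["jacket", "bomber", "denim jacket"].any (fun w => PySem.Str.isIn w dl) then "jacket"
    else if ["coat", "trench coat", "overcoat"].any (fun w => PySem.Str.isIn w dl) then "coat"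
    else if ["blazer"].any (fun w => PySem.Str.isIn w dl) then "blazer"
    else if ["hoodie", "hoody"].any (fun w => PySem.Str.isIn w dl) then "hoodie"
    else "jacket"
  else "unknown"

-- ===== PORT B =====
-- the module-level flat keyword table _KEYWORDS of Source B
def pvFlat : PySem.Dict String (List (String × Int × String) × String) :=
  PySem.Dict.mk [
    ("shoes", ([
        ("boot", 0, "boots"),
        ("combat boot", 0, "boots"),
        ("hiking boot", 0, "boots"),
        ("work boot", 0, "boots"),
        ("sneaker", 1, "sneakers"),
        ("trainer", 1, "sneakers"),
        ("athletic shoe", 1, "sneakers"),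
        ("running shoe", 1, "sneakers"),
        ("sandal", 2, "sandals"),
        ("flip-flop", 2, "sandals"),
        ("heel", 3, "heels"),
        ("pump", 3, "heels"),
        ("stiletto", 3, "heels"),
        ("flat", 4, "flats"),
        ("ballet flat", 4, "flats"),
        ("loafer", 5, "loafers"),
        ("oxford", 5, "loafers")
      ], "shoes")),
    ("lower_body", ([
        ("short", 0, "shorts"),
        ("bermuda", 0, "shorts"),
        ("cargo short", 0, "shorts"),
        ("skirt", 1, "skirt"),
        ("mini skirt", 1, "skirt"),
        ("pencil skirt", 1, "skirt"),
        ("a-line skirt", 1, "skirt"),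
        ("jean", 2, "jeans"),
        ("denim", 2, "jeans"),
        ("pant", 3, "pants"),
        ("trouser", 3, "pants"),
        ("slack", 3, "pants"),
        ("legging", 4, "leggings"),
        ("yoga pant", 4, "leggings")
      ], "pants")),
    ("upper_body", ([
        ("t-shirt", 0, "tshirt"),
        ("tee", 0, "tshirt"),
        ("tshirt", 0, "tshirt"),
        ("shirt", 1, "shirt"),
        ("button-down", 1, "shirt"),
        ("dress shirt", 1, "shirt"),
        ("blouse", 2, "blouse"),
        ("sweater", 3, "sweater"),
        ("pullover", 3, "sweater"),
        ("tank top", 4, "tank"),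
        ("camisole", 4, "tank"),
        ("polo", 5, "polo")
      ], "shirt")),
    ("accessories", ([
        ("hat", 0, "hat"),
        ("cap", 0, "hat"),
        ("baseball cap", 0, "hat"),
        ("beanie", 0, "hat"),
        ("bag", 1, "bag"),
        ("purse", 1, "bag"),
        ("backpack", 1, "bag"),
        ("handbag", 1, "bag"),
        ("belt", 2, "belt"),
        ("scarf", 3, "scarf")
      ], "accessory")),
    ("dresses", ([
        ("dress", 0, "dress"),
        ("gown", 0, "dress"),
        ("frock", 0, "dress"),
        ("jumpsuit", 1, "jumpsuit"),
        ("romper", 2, "romper")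
      ], "dress")),
    ("outerwear", ([
        ("jacket", 0, "jacket"),
        ("bomber", 0, "jacket"),
        ("denim jacket", 0, "jacket"),
        ("coat", 1, "coat"),
        ("trench coat", 1, "coat"),
        ("overcoat", 1, "coat"),
        ("blazer", 2, "blazer"),
        ("hoodie", 3, "hoodie"),
        ("hoody", 3, "hoodie")
      ], "jacket"))]

-- the 'for kw, rank, label in triples' single pass of Source B (running minimum)
def pvBest (dl : String) : List (String × Int × String) → Option (Int × String) → Option (Int × String)
  | [], best => best
  | (kw, rank, label) :: rest, best =>
      pvBest dl rest
        (if PySem.Str.isIn kw dl &&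
            (match best with | none => true | some (r, _) => decide (rank < r))
         then some (rank, label) else best)

def extract_specific_item_type_py_alt (description : String) (category : String) : String :=
  match pvFlat.get? category with
  | none => "unknown"
  | some (triples, dflt) =>
      match pvBest (PySem.Str.lower description) triples none with
      | none => dflt
      | some (_, label) => label

-- ===== PRECONDITION & SPEC =====
def Spec_extract_specific_item_type_py (description : String) (category : String) (out : String) : Prop := out = extract_specific_item_type_py_alt description category
instance (description : String) (category : String) (out : String) : Decidable (Spec_extract_specific_item_type_py description category out) := by unfold Spec_extract_specific_item_type_py; infer_instance

-- ===== CLAIM (what is proved, stated in full; the proofs are below) =====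
def Claim_equal_extract_specific_item_type_py : Prop := ∀ (description : String) (category : String), Dom_extract_specific_item_type_py description category → Spec_extract_specific_item_type_py description category (extract_specific_item_type_py description category)

-- ===== LEMMAS AND PROOFS =====

-- first-match scan over grouped rules (A's shape), as an Option
def pvScanOpt (dl : String) : List (List String × String) → Option String
  | [] => none
  | (ws, lab) :: rest =>
      if ws.any (fun w => PySem.Str.isIn w dl) then some lab else pvScanOpt dl rest

-- grouped rules flattened to keyword triples with ranks starting at k
def pvFlatten (k : Int) : List (List String × String) → List (String × Int × String)
  | [] => []
  | (ws, lab) :: rest => ws.map (fun w => (w, k, lab)) ++ pvFlatten (k + 1) rest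

theorem pvFlatten_rank_le (k : Int) (rules : List (List String × String)) :
    ∀ e ∈ pvFlatten k rules, k ≤ e.2.1 := by
  induction rules generalizing k with
  | nil => simp [pvFlatten]
  | cons r rest ih =>
      obtain ⟨ws, lab⟩ := r
      intro e he
      simp only [pvFlatten, List.mem_append, List.mem_map] at he
      rcases he with ⟨w, _, rfl⟩ | he
      · exact le_refl k
      · have := ih (k + 1) e he; omega

theorem pvBest_frozen (dl : String) (L : List (String × Int × String)) (r : Int) (lab : String)
    (h : ∀ e ∈ L, r ≤ e.2.1) : pvBest dl L (some (r, lab)) = some (r, lab) := by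
  induction L with
  | nil => rfl
  | cons e rest ih =>
      obtain ⟨kw, rank, l⟩ := e
      have hr : r ≤ rank := h _ (List.mem_cons_self ..)
      have : ¬ rank < r := by omega
      simp only [pvBest, this, decide_false, Bool.and_false]
      exact ih (fun e he => h e (List.mem_cons_of_mem _ he))

theorem pvBest_seg_no_match (dl : String) (ws : List String) (k : Int) (lab : String)
    (L : List (String × Int × String)) (acc : Option (Int × String))
    (h : ws.any (fun w => PySem.Str.isIn w dl) = false) :
    pvBest dl (ws.map (fun w => (w, k, lab)) ++ L) acc = pvBest dl L acc := by
  induction ws with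
  | nil => rfl
  | cons w rest ih =>
      simp only [List.any_cons, Bool.or_eq_false_iff] at h
      simp only [List.map_cons, List.cons_append, pvBest, h.1, Bool.false_and]
      exact ih h.2

theorem pvBest_seg_keep (dl : String) (ws : List String) (k : Int) (lab : String)
    (L : List (String × Int × String)) (l' : String) :
    pvBest dl (ws.map (fun w => (w, k, lab)) ++ L) (some (k, l')) = pvBest dl L (some (k, l')) := by
  induction ws with
  | nil => rfl
  | cons w rest ih =>
      have : ¬ k < k := lt_irrefl k
      simp only [List.map_cons, List.cons_append, pvBest, this, decide_false, Bool.and_false]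
      exact ih

theorem pvBest_seg_match (dl : String) (ws : List String) (k : Int) (lab : String)
    (L : List (String × Int × String))
    (h : ws.any (fun w => PySem.Str.isIn w dl) = true) :
    pvBest dl (ws.map (fun w => (w, k, lab)) ++ L) none = pvBest dl L (some (k, lab)) := by
  induction ws with
  | nil => simp at h
  | cons w rest ih =>
      by_cases hw : PySem.Str.isIn w dl = true
      · simp only [List.map_cons, List.cons_append, pvBest, hw, Bool.true_and]
        exact pvBest_seg_keep dl rest k lab L lab
      · simp only [List.any_cons, hw, Bool.false_or] at h
        simp only [List.map_cons, List.cons_append, pvBest,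
          eq_false_of_ne_true hw, Bool.false_and]
        exact ih h

theorem pvBest_flatten (dl : String) (rules : List (List String × String)) (k : Int) :
    Option.map Prod.snd (pvBest dl (pvFlatten k rules) none) = pvScanOpt dl rules := by
  induction rules generalizing k with
  | nil => rfl
  | cons r rest ih =>
      obtain ⟨ws, lab⟩ := r
      by_cases h : ws.any (fun w => PySem.Str.isIn w dl) = true
      · simp only [pvFlatten, pvScanOpt, h]
        rw [pvBest_seg_match dl ws k lab _ h,
          pvBest_frozen dl _ k lab (fun e he => by
            have := pvFlatten_rank_le (k + 1) rest e he; omega)]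
        rfl
      · have h' := eq_false_of_ne_true h
        simp only [pvFlatten, pvScanOpt, h']
        rw [pvBest_seg_no_match dl ws k lab _ none h']
        exact ih (k + 1)

theorem pvMatch_eq_getD (o : Option (Int × String)) (d : String) :
    (match o with | none => d | some (_, label) => label) = (Option.map Prod.snd o).getD d := by
  cases o with
  | none => rfl
  | some p => obtain ⟨a, b⟩ := p; rfl

-- ===== VERDICT (by name: the statement is the Claim_ definition above) =====
theorem extract_specific_item_type_py_spec : Claim_equal_extract_specific_item_type_py := by
  intro description category _
  unfold Spec_extract_specific_item_type_py
  by_cases h1 : category = "shoes"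
  · subst h1
    simp only [extract_specific_item_type_py, extract_specific_item_type_py_alt]
    simp only [show pvFlat.get? "shoes" = some (pvFlatten 0 [(["boot", "combat boot", "hiking boot", "work boot"], "boots"), (["sneaker", "trainer", "athletic shoe", "running shoe"], "sneakers"), (["sandal", "flip-flop"], "sandals"), (["heel", "pump", "stiletto"], "heels"), (["flat", "ballet flat"], "flats"), (["loafer", "oxford"], "loafers")], "shoes") from by decide]
    rw [pvMatch_eq_getD, pvBest_flatten]
    simp only [if_true, if_false]
    simp only [pvScanOpt]
    split_ifs <;> rfl
  by_cases h2 : category = "lower_body"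
  · subst h2
    simp only [extract_specific_item_type_py, extract_specific_item_type_py_alt]
    simp only [show pvFlat.get? "lower_body" = some (pvFlatten 0 [(["short", "bermuda", "cargo short"], "shorts"), (["skirt", "mini skirt", "pencil skirt", "a-line skirt"], "skirt"), (["jean", "denim"], "jeans"), (["pant", "trouser", "slack"], "pants"), (["legging", "yoga pant"], "leggings")], "pants") from by decide]
    rw [pvMatch_eq_getD, pvBest_flatten]
    simp only [if_true, if_false]
    simp only [pvScanOpt]
    split_ifs <;> rfl
  by_cases h3 : category = "upper_body"
  · subst h3
    simp only [extract_specific_item_type_py, extract_specific_item_type_py_alt]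
    simp only [show pvFlat.get? "upper_body" = some (pvFlatten 0 [(["t-shirt", "tee", "tshirt"], "tshirt"), (["shirt", "button-down", "dress shirt"], "shirt"), (["blouse"], "blouse"), (["sweater", "pullover"], "sweater"), (["tank top", "camisole"], "tank"), (["polo"], "polo")], "shirt") from by decide]
    rw [pvMatch_eq_getD, pvBest_flatten]
    simp only [if_true, if_false]
    simp only [pvScanOpt]
    split_ifs <;> rfl
  by_cases h4 : category = "accessories"
  · subst h4
    simp only [extract_specific_item_type_py, extract_specific_item_type_py_alt]
    simp only [show pvFlat.get? "accessories" = some (pvFlatten 0 [(["hat", "cap", "baseball cap", "beanie"], "hat"), (["bag", "purse", "backpack", "handbag"], "bag"), (["belt"], "belt"), (["scarf"], "scarf")], "accessory") from by decide]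
    rw [pvMatch_eq_getD, pvBest_flatten]
    simp only [if_true, if_false]
    simp only [pvScanOpt]
    split_ifs <;> rfl
  by_cases h5 : category = "dresses"
  · subst h5
    simp only [extract_specific_item_type_py, extract_specific_item_type_py_alt]
    simp only [show pvFlat.get? "dresses" = some (pvFlatten 0 [(["dress", "gown", "frock"], "dress"), (["jumpsuit"], "jumpsuit"), (["romper"], "romper")], "dress") from by decide]
    rw [pvMatch_eq_getD, pvBest_flatten]
    simp only [if_true, if_false]
    simp only [pvScanOpt]
    split_ifs <;> rfl
  by_cases h6 : category = "outerwear"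
  · subst h6
    simp only [extract_specific_item_type_py, extract_specific_item_type_py_alt]
    simp only [show pvFlat.get? "outerwear" = some (pvFlatten 0 [(["jacket", "bomber", "denim jacket"], "jacket"), (["coat", "trench coat", "overcoat"], "coat"), (["blazer"], "blazer"), (["hoodie", "hoody"], "hoodie")], "jacket") from by decide]
    rw [pvMatch_eq_getD, pvBest_flatten]
    simp only [if_true, if_false]
    simp only [pvScanOpt]
    split_ifs <;> rfl
  · simp only [extract_specific_item_type_py, extract_specific_item_type_py_alt]
    have hnone : pvFlat.get? category = none := by
      simp [pvFlat, PySem.Dict.get?, PySem.Dict.get?_mk_cons, Ne.symm h1, Ne.symm h2, Ne.symm h3, Ne.symm h4, Ne.symm h5, Ne.symm h6]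
    rw [hnone, if_neg h1, if_neg h2, if_neg h3, if_neg h4, if_neg h5, if_neg h6]
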